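-- pv_equiv track=rewrite | github.com/kareemkhalidi/CSC120 | Short Project 10/bob.py | remove_s_less_than_2
-- ===== SOURCE A (Python) =====
-- def remove_s_less_than_2(data):
--     '''Summary: removes all elements from array with len < 2
--        Arguments: data (array)
--        Returns: data (array without elements len < 2)
--        Assumptions: None
--        Nothing else of interest
--     '''
--     i = 0
--     while i < len(data):
--         if len(data[i]) < 2:
--             data.pop(i)
--             i -= 1
--         i += 1
--     return(data)
-- ===== SOURCE B (Python) =====
-- def remove_s_less_than_2(data):
--     data[:] = [x for x in data if len(x) >= 2]
--     return data
-- ===== Notes on version B (the rewrite author's own statement) =====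
-- stated objective: idiomatic
-- what changed: Replaced the pop-and-rewind while loop (each pop shifts the whole tail, O(n^2) worst case) with a single filter comprehension assigned back into the list via data[:] = ..., keeping the in-place mutation contract.
import Mathlib
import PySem

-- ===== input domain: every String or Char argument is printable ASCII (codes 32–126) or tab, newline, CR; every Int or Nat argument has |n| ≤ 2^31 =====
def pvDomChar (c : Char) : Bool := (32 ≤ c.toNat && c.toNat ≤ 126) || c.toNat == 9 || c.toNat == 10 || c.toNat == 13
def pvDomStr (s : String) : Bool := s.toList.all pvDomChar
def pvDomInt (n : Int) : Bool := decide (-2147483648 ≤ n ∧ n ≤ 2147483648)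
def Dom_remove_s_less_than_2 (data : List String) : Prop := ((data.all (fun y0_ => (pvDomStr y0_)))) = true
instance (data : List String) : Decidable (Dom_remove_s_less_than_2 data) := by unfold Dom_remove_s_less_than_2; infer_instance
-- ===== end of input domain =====

-- B: replace A's pop-and-rewind while loop (O(n^2) worst case) with the idiomatic one-pass
-- filter comprehension assigned back via data[:] = ..., keeping the in-place mutation;
-- same return value. Both A and B mutate `data` in place in Python; the equivalence proved
-- here is about the return value (which equals the mutated list in both).

-- ===== PORT A =====
-- while i < len(data): if len(data[i]) < 2: data.pop(i); i -= 1; i += 1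
-- (after a pop, `i -= 1` followed by `i += 1` leaves i unchanged, and i never goes below 0,
-- so the loop state is faithfully carried by a Nat index)
def pvLoopA (data : List String) (i : Nat) : List String :=
  if h : i < data.length then
    if PySem.Str.len (data.getD i "") < 2 then
      pvLoopA (data.eraseIdx i) i          -- data.pop(i); i -= 1; i += 1
    else
      pvLoopA data (i + 1)                 -- i += 1
  else data
termination_by data.length - i
decreasing_by
  · simp [List.length_eraseIdx, h]; omega
  · omega

def remove_s_less_than_2 (data : List String) : List String :=
  pvLoopA data 0

-- ===== PORT B =====
-- data[:] = [x for x in data if len(x) >= 2]; return data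
def remove_s_less_than_2_alt (data : List String) : List String :=
  data.filter (fun x => 2 ≤ PySem.Str.len x)

-- ===== PRECONDITION & SPEC =====
def Spec_remove_s_less_than_2 (data : List String) (out : List String) : Prop := out = remove_s_less_than_2_alt data
instance (data : List String) (out : List String) : Decidable (Spec_remove_s_less_than_2 data out) := by unfold Spec_remove_s_less_than_2; infer_instance

-- ===== CLAIM (what is proved, stated in full; the proofs are below) =====
def Claim_equal_remove_s_less_than_2 : Prop := ∀ (data : List String), Dom_remove_s_less_than_2 data → Spec_remove_s_less_than_2 data (remove_s_less_than_2 data)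

-- ===== LEMMAS AND PROOFS =====

theorem pvLoopA_eq (data : List String) (i : Nat) :
    pvLoopA data i = data.take i ++ (data.drop i).filter (fun x => 2 ≤ PySem.Str.len x) := by
  fun_induction pvLoopA data i with
  | case1 data i h hlt ih =>
    rw [List.getD_eq_getElem _ _ h] at hlt
    have hk : (2 ≤ PySem.Str.len data[i] : Bool) = false := by
      simp only [decide_eq_false_iff_not]; omega
    rw [ih, List.eraseIdx_eq_take_drop_succ,
      List.take_append_of_le_length (by simp [Nat.le_of_lt h]),
      List.drop_append_of_le_length (by simp [Nat.le_of_lt h]),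
      List.take_take, Nat.min_self, List.drop_eq_getElem_cons h,
      List.filter_cons_of_neg (by simpa using hk)]
    simp
  | case2 data i h hge ih =>
    rw [List.getD_eq_getElem _ _ h] at hge
    have hk : (2 ≤ PySem.Str.len data[i] : Bool) = true := by
      simp only [decide_eq_true_eq]; omega
    rw [ih, List.drop_eq_getElem_cons h, List.filter_cons_of_pos (by simpa using hk),
      List.take_add_one, List.getElem?_eq_getElem h, Option.toList_some, List.append_assoc,
      List.singleton_append]
  | case3 data i h =>
    have hle : data.length ≤ i := Nat.le_of_not_lt h
    simp [List.take_of_length_le hle, List.drop_of_length_le hle]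

-- ===== VERDICT (by name: the statement is the Claim_ definition above) =====
theorem remove_s_less_than_2_spec : Claim_equal_remove_s_less_than_2 := by
  intro data _
  unfold Spec_remove_s_less_than_2 remove_s_less_than_2 remove_s_less_than_2_alt
  rw [pvLoopA_eq]
  simp
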